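-- pv_equiv track=rewrite | github.com/YuraBD/Puzzle | puzzle.py | horizontal_check
-- ===== SOURCE A (Python) =====
-- def horizontal_check(board: list) -> bool:
--     '''
--     Check if rows have similar numbers
--     Return False if have, True otherwise
--
--     >>> horizontal_check(["**** ****","***1 ****","**  3****",\
--                           "* 4 1****","     9 5 "," 6  83  *",\
--                           "3   1  **","  8  2***","  2  ****"])
--     True
--     >>> horizontal_check(["**** ****","***11****","**  3****",\
--                           "* 4 1****","     9 5 "," 6  83  *",\
--                           "3   1  **","  8  2***","  2  ****"])
--     False
--     '''
--     c_board = board.copy()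
--     for row in c_board:
--         row = row.replace('*', '')
--         row = row.replace(' ', '')
--         while row:
--             if row.count(row[0]) != 1:
--                 return False
--             row = row.replace(row[0], '')
--     return True
-- ===== SOURCE B (Python) =====
-- def horizontal_check(board: list) -> bool:
--     for row in board:
--         seen = set()
--         for ch in row:
--             if ch == '*' or ch == ' ':
--                 continue
--             if ch in seen:
--                 return False
--             seen.add(ch)
--     return True
-- ===== Notes on version B (the rewrite author's own statement) =====
-- stated objective: simpler
-- what changed: The inner repeated count-and-replace scanning loop is replaced by a single pass over each row that accumulates seen digits in a set and fails on the first repeat.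
import Mathlib
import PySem

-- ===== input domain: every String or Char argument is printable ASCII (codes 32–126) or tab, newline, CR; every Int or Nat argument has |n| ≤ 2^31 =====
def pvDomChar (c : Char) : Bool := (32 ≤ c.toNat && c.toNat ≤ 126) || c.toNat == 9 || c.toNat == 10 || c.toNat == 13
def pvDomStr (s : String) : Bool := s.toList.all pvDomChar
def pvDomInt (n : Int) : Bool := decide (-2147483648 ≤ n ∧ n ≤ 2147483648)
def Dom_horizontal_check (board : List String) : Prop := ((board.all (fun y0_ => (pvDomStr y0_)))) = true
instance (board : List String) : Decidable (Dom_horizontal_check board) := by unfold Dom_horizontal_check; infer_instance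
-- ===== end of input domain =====

-- ===== PORT A =====
-- B replaces A's repeated count-and-replace inner loop with a single seen-set pass per row (simpler; return value only, A's copy() has no observable effect).

-- 'replace(c, '')' on a one-char pattern drops every occurrence of c (used by the port's termination proof).
theorem pvReplaceGo_single (c : Char) : ∀ (fuel : Nat) (l acc : List Char), l.length ≤ fuel →
    PySem.Chars.replace.go [c] [] fuel l acc = acc.reverse ++ l.filter (· != c) := by
  intro fuel
  induction fuel with
  | zero => intro l acc h; cases l with
    | nil => simp [PySem.Chars.replace.go]
    | cons x t => simp at h
  | succ n ih =>
    intro l acc h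
    cases l with
    | nil => simp [PySem.Chars.replace.go]
    | cons x t =>
      simp only [PySem.Chars.replace.go]
      by_cases hx : x = c
      · subst hx
        have : List.isPrefixOf [x] (x :: t) = true := by simp [List.isPrefixOf]
        simp only [this, if_true, List.length_cons, List.drop_succ_cons, List.length_nil, List.drop_zero, List.reverse_nil, List.nil_append]
        rw [ih t acc (by simpa using Nat.le_of_succ_le_succ h)]
        simp
      · have : List.isPrefixOf [c] (x :: t) = false := by
          simp [List.isPrefixOf]; exact fun hcx => (hx hcx.symm).elim
        simp only [this, Bool.false_eq_true, if_false]
        rw [ih t (x :: acc) (by simpa using Nat.le_of_succ_le_succ h)]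
        simp [hx]

theorem pvReplace_single (c : Char) (l : List Char) :
    PySem.Chars.replace l [c] [] = l.filter (· != c) := by
  simp only [PySem.Chars.replace, List.isEmpty_cons, Bool.false_eq_true, if_false]
  simpa using pvReplaceGo_single c l.length l [] le_rfl

-- A's inner 'while row:' loop
def pvRowA : List Char -> Bool
  | [] => true
  | c :: t =>
    if PySem.Chars.count (c :: t) [c] != 1 then false
    else pvRowA (PySem.Chars.replace (c :: t) [c] [])
termination_by l => l.length
decreasing_by
  rw [pvReplace_single]
  simp only [List.filter_cons, bne_self_eq_false, Bool.false_eq_true, if_false, List.length_cons]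
  exact Nat.lt_succ_of_le (List.length_filter_le _ _)

-- A's outer 'for row in c_board:' loop (early return False)
def pvLoopA : List String -> Bool
  | [] => true
  | row :: rest =>
    if pvRowA (PySem.Chars.replace (PySem.Chars.replace row.toList ['*'] []) [' '] []) then pvLoopA rest
    else false

def horizontal_check (board : List String) : Bool := pvLoopA board

-- ===== PORT B =====
-- B's inner 'for ch in row:' loop carrying the seen set
def pvRowB (seen : PySem.Set Char) : List Char -> Bool
  | [] => true
  | c :: t =>
    if c == '*' || c == ' ' then pvRowB seen t
    else if PySem.Set.contains seen c then false
    else pvRowB (PySem.Set.add seen c) t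

def pvLoopB : List String -> Bool
  | [] => true
  | row :: rest => if pvRowB PySem.Set.empty row.toList then pvLoopB rest else false

def horizontal_check_alt (board : List String) : Bool := pvLoopB board

-- ===== PRECONDITION & SPEC =====
def Spec_horizontal_check (board : List String) (out : Bool) : Prop := out = horizontal_check_alt board
instance (board : List String) (out : Bool) : Decidable (Spec_horizontal_check board out) := by unfold Spec_horizontal_check; infer_instance

-- ===== CLAIM (what is proved, stated in full; the proofs are below) =====
def Claim_equal_horizontal_check : Prop := ∀ (board : List String), Dom_horizontal_check board → Spec_horizontal_check board (horizontal_check board)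

-- ===== LEMMAS AND PROOFS =====

theorem pvCountGo_single (c : Char) : ∀ (fuel : Nat) (l : List Char) (acc : Nat), l.length ≤ fuel →
    PySem.Chars.count.go [c] fuel l acc = acc + l.count c := by
  intro fuel
  induction fuel with
  | zero => intro l acc h; cases l with
    | nil => simp [PySem.Chars.count.go]
    | cons x t => simp at h
  | succ n ih =>
    intro l acc h
    cases l with
    | nil => simp [PySem.Chars.count.go]
    | cons x t =>
      simp only [PySem.Chars.count.go]
      by_cases hx : x = c
      · subst hx
        have : List.isPrefixOf [x] (x :: t) = true := by simp [List.isPrefixOf]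
        simp only [this, if_true, List.length_cons, List.drop_succ_cons, List.length_nil, List.drop_zero]
        rw [ih t (acc + 1) (by simpa using Nat.le_of_succ_le_succ h)]
        simp
        omega
      · have : List.isPrefixOf [c] (x :: t) = false := by
          simp [List.isPrefixOf]; exact fun hcx => (hx hcx.symm).elim
        simp only [this, Bool.false_eq_true, if_false]
        rw [ih t acc (by simpa using Nat.le_of_succ_le_succ h)]
        simp [hx]

theorem pvCount_single (c : Char) (l : List Char) :
    PySem.Chars.count l [c] = l.count c := by
  simp only [PySem.Chars.count, List.isEmpty_cons, Bool.false_eq_true, if_false]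
  simpa using pvCountGo_single c l.length l 0 le_rfl


theorem pvRowA_eq_nodup (l : List Char) : pvRowA l = decide l.Nodup := by
  induction l using pvRowA.induct with
  | case1 => simp [pvRowA]
  | case2 c t hcnt =>
      rw [pvRowA]
      simp only [hcnt, if_true]
      rw [pvCount_single] at hcnt
      have hc : c ∈ t := by
        simp at hcnt
        exact List.count_pos_iff.mp (by omega)
      simp [List.nodup_cons, hc]
  | case3 c t hcnt ih =>
      rw [pvRowA]
      simp only [hcnt, Bool.false_eq_true, if_false]
      rw [pvCount_single] at hcnt
      have hc : c ∉ t := by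
        simp at hcnt
        intro hmem
        have := List.count_pos_iff.mpr hmem
        omega
      rw [pvReplace_single] at ih ⊢
      have hfilt : t.filter (· != c) = t :=
        List.filter_eq_self.mpr (fun x hx => by simp; rintro rfl; exact hc hx)
      simp only [List.filter_cons, bne_self_eq_false, Bool.false_eq_true, if_false, hfilt] at ih ⊢
      rw [ih]
      simp [List.nodup_cons, hc]

def pvKeep (c : Char) : Bool := !(c == '*' || c == ' ')

theorem pvRowB_eq (l : List Char) : ∀ (seen : List Char),
    pvRowB seen l = decide ((l.filter pvKeep).Nodup ∧ ∀ c ∈ l.filter pvKeep, c ∉ seen) := by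
  induction l with
  | nil => intro seen; simp [pvRowB]
  | cons c t ih =>
      intro seen
      rw [pvRowB]
      by_cases hk : (c == '*' || c == ' ') = true
      · simp only [hk, if_true, ih]
        have : pvKeep c = false := by simp [pvKeep, hk]
        simp [this]
      · have hkeep : pvKeep c = true := by simp [pvKeep]; simpa using hk
        simp only [Bool.not_eq_true] at hk
        simp only [hk, Bool.false_eq_true, if_false]
        by_cases hs : c ∈ seen
        · have : PySem.Set.contains seen c = true := by
            simp [PySem.Set.contains]; exact hs
          simp only [this, if_true]
          have : c ∈ (c :: t).filter pvKeep := by simp [hkeep]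
          simp only [eq_comm (a := false), decide_eq_false_iff_not]
          intro hcon
          exact (hcon.2 c this) hs
        · have hcon : PySem.Set.contains seen c = false := by
            simp [PySem.Set.contains]; exact hs
          simp only [hcon, Bool.false_eq_true, if_false]
          rw [ih]
          have hadd : ∀ x, x ∈ PySem.Set.add seen c ↔ x ∈ seen ∨ x = c :=
            fun x => PySem.Set.mem_add seen c x
          simp only [List.filter_cons, hkeep, if_true, List.nodup_cons, List.mem_cons,
            decide_eq_decide]
          constructor
          · rintro ⟨hnd, hall⟩
            refine ⟨⟨fun hct => (hall c hct ((hadd c).mpr (Or.inr rfl))).elim, hnd⟩, ?_⟩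
            rintro x (rfl | hx)
            · exact hs
            · exact fun hxs => hall x hx ((hadd x).mpr (Or.inl hxs))
          · rintro ⟨⟨hct, hnd⟩, hall⟩
            refine ⟨hnd, fun x hx hxa => ?_⟩
            rcases (hadd x).mp hxa with hxs | rfl
            · exact hall x (Or.inr hx) hxs
            · exact hct hx

theorem pvRow_agree (row : List Char) :
    pvRowA (PySem.Chars.replace (PySem.Chars.replace row ['*'] []) [' '] []) =
    pvRowB PySem.Set.empty row := by
  rw [pvRowA_eq_nodup, pvRowB_eq, pvReplace_single, pvReplace_single, List.filter_filter]
  have : (fun a => (a != ' ') && (a != '*')) = pvKeep := by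
    funext a; simp [pvKeep, bne, Bool.and_comm]
  rw [this]
  simp [PySem.Set.empty]

theorem pvLoop_agree : ∀ (bs : List String), pvLoopA bs = pvLoopB bs
  | [] => rfl
  | row :: rest => by rw [pvLoopA, pvLoopB, pvRow_agree row.toList, pvLoop_agree rest]

-- ===== VERDICT (by name: the statement is the Claim_ definition above) =====
theorem horizontal_check_spec : Claim_equal_horizontal_check := by
  intro board _
  unfold Spec_horizontal_check horizontal_check horizontal_check_alt
  exact pvLoop_agree board
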